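-- pv_equiv track=rewrite | github.com/Cojense4/CSCI3320 | Jan31_24.py | functionE
-- ===== SOURCE A (Python) =====
-- def functionE(a, n):
-- 	if n == 1:
-- 		return a[0]
-- 	else:
-- 		x = functionE(a, n - 1)
-- 	if x > a[n - 1]:
-- 		return x
-- 	else:
-- 		return a[n - 1]
-- ===== SOURCE B (Python) =====
-- def functionE(a, n):
-- 	x = a[0]
-- 	for i in range(1, n):
-- 		if a[i] > x:
-- 			x = a[i]
-- 	return x
-- ===== Notes on version B (the rewrite author's own statement) =====
-- stated objective: idiomatic
-- what changed: Replaced the recursive running-max (one call per element) with a single iterative scan over the first n elements keeping a running maximum.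
import Mathlib
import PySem

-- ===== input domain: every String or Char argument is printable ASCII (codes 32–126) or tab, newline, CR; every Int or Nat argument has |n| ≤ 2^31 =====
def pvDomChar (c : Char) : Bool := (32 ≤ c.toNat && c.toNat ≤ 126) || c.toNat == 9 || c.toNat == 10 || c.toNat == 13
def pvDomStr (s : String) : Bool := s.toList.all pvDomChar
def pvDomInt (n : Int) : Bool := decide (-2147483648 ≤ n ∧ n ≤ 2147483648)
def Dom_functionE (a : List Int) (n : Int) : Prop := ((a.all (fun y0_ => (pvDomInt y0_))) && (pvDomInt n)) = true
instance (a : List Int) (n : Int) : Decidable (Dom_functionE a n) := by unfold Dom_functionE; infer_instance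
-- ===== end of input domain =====

-- ===== PORT A =====
-- Recursive running max of a[0..n-1]; recursion on n via a Nat counter (n.toNat).
-- For n ≤ 0 the Python diverges (excluded by Pre_); the Nat-0 branch is unreachable there.
-- Out-of-range indexing (Python IndexError) is excluded by Pre_; pyGet? …getD 0 is the total form.
def functionEAux (a : List Int) : Nat → Int
  | 0 => 0
  | 1 => (PySem.List.pyGet? a 0).getD 0
  | (m + 2) =>
      let x := functionEAux a (m + 1)
      let an := (PySem.List.pyGet? a ((m : Int) + 1)).getD 0
      if x > an then x else an

def functionE (a : List Int) (n : Int) : Int := functionEAux a n.toNat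

-- ===== PORT B =====
-- Iterative scan: x = a[0], then for i in range(1, n): if a[i] > x: x = a[i].
def functionE_alt (a : List Int) (n : Int) : Int :=
  (PySem.List.pyRange 1 n 1).foldl
    (fun x i => let ai := (PySem.List.pyGet? a i).getD 0; if ai > x then ai else x)
    ((PySem.List.pyGet? a 0).getD 0)

-- ===== PRECONDITION & SPEC =====
-- Pre_ excludes exactly the inputs where Python A raises: n ≤ 0 (infinite recursion,
-- RecursionError) and n > len(a) (IndexError at a[n-1]).
def Pre_functionE (a : List Int) (n : Int) : Prop := 1 ≤ n ∧ n ≤ (a.length : Int)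
instance (a : List Int) (n : Int) : Decidable (Pre_functionE a n) := by unfold Pre_functionE; infer_instance
def pvWitness_functionE : List Int × Int := ([3, 1, 4], 3)

def Spec_functionE (a : List Int) (n : Int) (out : Int) : Prop := out = functionE_alt a n
instance (a : List Int) (n : Int) (out : Int) : Decidable (Spec_functionE a n out) := by unfold Spec_functionE; infer_instance

-- ===== CLAIM (what is proved, stated in full; the proofs are below) =====
def Claim_equal_functionE : Prop := ∀ (a : List Int) (n : Int), Dom_functionE a n → Pre_functionE a n → Spec_functionE a n (functionE a n)

-- ===== LEMMAS AND PROOFS =====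

-- For m ≥ 1, the recursive accumulation equals the fold over range(1, m).
theorem functionEAux_eq_fold (a : List Int) (m : Nat) (hm : 1 ≤ m) :
    functionEAux a m = functionE_alt a (m : Int) := by
  induction m with
  | zero => omega
  | succ k ih =>
    cases k with
    | zero =>
      simp [functionEAux, functionE_alt,
        PySem.List.pyRange_one_eq_nil]
    | succ j =>
      have h1 : (1 : Int) ≤ (j : Int) + 1 := by omega
      have hrng : PySem.List.pyRange 1 ((j : Int) + 1 + 1) 1
          = PySem.List.pyRange 1 ((j : Int) + 1) 1 ++ [(j : Int) + 1] :=
        PySem.List.pyRange_one_succ_right h1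
      have ih' := ih (by omega)
      push_cast at ih'
      unfold functionEAux
      simp only [functionE_alt] at ih' ⊢
      push_cast
      rw [hrng, List.foldl_append, ← ih']
      simp only [List.foldl]
      set x := functionEAux a (j + 1)
      set an := (PySem.List.pyGet? a ((j : Int) + 1)).getD 0
      by_cases h : x > an
      · simp [h, not_lt.mpr (le_of_lt h)]
      · by_cases h2 : an > x
        · simp [h, h2]
        · have : an = x := le_antisymm (not_lt.mp h2) (not_lt.mp h)
          simp [this]

-- ===== VERDICT (by name: the statement is the Claim_ definition above) =====
theorem functionE_spec : Claim_equal_functionE := by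
  intro a n _ hpre
  unfold Pre_functionE at hpre
  have h1 : (1 : Nat) ≤ n.toNat := by omega
  have h2 : (n.toNat : Int) = n := by omega
  show functionE a n = functionE_alt a n
  unfold functionE
  rw [functionEAux_eq_fold a n.toNat h1, h2]
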